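-- pv_equiv track=rewrite | github.com/xQUANTUMTECH/linkedin-bot-ai | grok_api.py | _extract_waste_info
-- ===== SOURCE A (Python) =====
-- from typing import Dict, List, Optional
--
-- def _extract_waste_info(result: str) -> Dict[str, str]:
--     """Estrae evidenze di sprechi e inefficienze"""
--     lines = result.split('\n')
--     problems = ""
--     evidence = ""
--
--     for line in lines:
--         if any(keyword in line.lower() for keyword in ['waste', 'inefficient', 'failed', 'criticism']):
--             problems = line.strip()[:90]
--         elif any(keyword in line.lower() for keyword in ['audit', 'report', 'investigation', 'found']):
--             evidence = line.strip()[:80]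
--
--     return {
--         'problems': problems or "Sprechi sistematici come sempre",
--         'evidence': evidence or "Audit confermano l'ovvio"
--     }
-- ===== SOURCE B (Python) =====
-- def _extract_waste_info(result: str) -> dict:
--     """Estrae evidenze di sprechi e inefficienze"""
--     PROBLEM_KEYS = ['waste', 'inefficient', 'failed', 'criticism']
--     EVIDENCE_KEYS = ['audit', 'report', 'investigation', 'found']
--
--     def matches(line, keys):
--         low = line.lower()
--         return any(k in low for k in keys)
--
--     lines = result.split('\n')
--     prob_lines = [l for l in lines if matches(l, PROBLEM_KEYS)]
--     evid_lines = [l for l in lines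
--                   if not matches(l, PROBLEM_KEYS) and matches(l, EVIDENCE_KEYS)]
--     problems = prob_lines[-1].strip()[:90] if prob_lines else ""
--     evidence = evid_lines[-1].strip()[:80] if evid_lines else ""
--     return {
--         'problems': problems or "Sprechi sistematici come sempre",
--         'evidence': evidence or "Audit confermano l'ovvio"
--     }
-- ===== Notes on version B (the rewrite author's own statement) =====
-- stated objective: alternative
-- what changed: Replaced A's single stateful last-match-wins scan with two filter passes (problem-keyword lines; evidence-keyword lines without a problem keyword, honouring the elif) reading the last element of each filtered list.
import Mathlib
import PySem

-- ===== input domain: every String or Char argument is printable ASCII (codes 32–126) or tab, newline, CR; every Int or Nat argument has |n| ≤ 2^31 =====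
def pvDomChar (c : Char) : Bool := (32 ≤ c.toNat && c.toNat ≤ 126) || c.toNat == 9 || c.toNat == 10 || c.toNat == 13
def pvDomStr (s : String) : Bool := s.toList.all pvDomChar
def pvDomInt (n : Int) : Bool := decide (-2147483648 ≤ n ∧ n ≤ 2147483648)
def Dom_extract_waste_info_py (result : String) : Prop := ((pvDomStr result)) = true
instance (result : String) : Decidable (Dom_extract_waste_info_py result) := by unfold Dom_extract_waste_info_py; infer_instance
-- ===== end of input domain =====

-- B replaces A's single stateful scan by two filter passes (problem lines; evidence lines without a
-- problem keyword) and reads the last element of each — objective: alternative decomposition, same cost.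

-- ===== PORT A =====
def pvProbKw : List String := ["waste", "inefficient", "failed", "criticism"]
def pvEvidKw : List String := ["audit", "report", "investigation", "found"]

def extract_waste_info_py (result : String) : List (String × String) :=
  let lines := (PySem.Str.split? result "\n").getD []
  let st := lines.foldl (fun (pe : String × String) line =>
    if pvProbKw.any (fun k => PySem.Str.isIn k (PySem.Str.lower line)) then
      (PySem.Str.slice (PySem.Str.strip line) none (some 90), pe.2)
    else if pvEvidKw.any (fun k => PySem.Str.isIn k (PySem.Str.lower line)) then
      (pe.1, PySem.Str.slice (PySem.Str.strip line) none (some 80))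
    else pe) ("", "")
  [("problems", if st.1 = "" then "Sprechi sistematici come sempre" else st.1),
   ("evidence", if st.2 = "" then "Audit confermano l'ovvio" else st.2)]

-- ===== PORT B =====
def pvMatches (line : String) (keys : List String) : Bool :=
  let low := PySem.Str.lower line
  keys.any (fun k => PySem.Str.isIn k low)

def extract_waste_info_py_alt (result : String) : List (String × String) :=
  let lines := (PySem.Str.split? result "\n").getD []
  let probLines := lines.filter (fun l => pvMatches l pvProbKw)
  let evidLines := lines.filter (fun l => !pvMatches l pvProbKw && pvMatches l pvEvidKw)
  let problems := match probLines.getLast? with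
    | some l => PySem.Str.slice (PySem.Str.strip l) none (some 90)
    | none => ""
  let evidence := match evidLines.getLast? with
    | some l => PySem.Str.slice (PySem.Str.strip l) none (some 80)
    | none => ""
  [("problems", if problems = "" then "Sprechi sistematici come sempre" else problems),
   ("evidence", if evidence = "" then "Audit confermano l'ovvio" else evidence)]

-- ===== PRECONDITION & SPEC =====
def Spec_extract_waste_info_py (result : String) (out : List (String × String)) : Prop := out = extract_waste_info_py_alt result
instance (result : String) (out : List (String × String)) : Decidable (Spec_extract_waste_info_py result out) := by unfold Spec_extract_waste_info_py; infer_instance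

-- ===== CLAIM (what is proved, stated in full; the proofs are below) =====
def Claim_equal_extract_waste_info_py : Prop := ∀ (result : String), Dom_extract_waste_info_py result → Spec_extract_waste_info_py result (extract_waste_info_py result)

-- ===== LEMMAS AND PROOFS =====

theorem pvMatches_def (line : String) (keys : List String) :
    (keys.any fun k => PySem.Str.isIn k (PySem.Str.lower line)) = pvMatches line keys := rfl

-- "last matching element, else the default" as a fold (used to bridge B's getLast? to a foldl).
theorem pvFoldl_last {α β : Type} (g : α → β) (l : List α) (init : β) :
    l.foldl (fun _ x => g x) init =
      (match l.getLast? with | some x => g x | none => init) := by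
  induction l using List.reverseRecOn with
  | nil => simp
  | append_singleton l a _ => simp [List.foldl_append]

-- A's fold, characterised componentwise by folds over B's filtered lists.
theorem pvFold_char (l : List String) (p e : String) :
    l.foldl (fun (pe : String × String) line =>
      if pvProbKw.any (fun k => PySem.Str.isIn k (PySem.Str.lower line)) then
        (PySem.Str.slice (PySem.Str.strip line) none (some 90), pe.2)
      else if pvEvidKw.any (fun k => PySem.Str.isIn k (PySem.Str.lower line)) then
        (pe.1, PySem.Str.slice (PySem.Str.strip line) none (some 80))
      else pe) (p, e)
    = ((l.filter (fun x => pvMatches x pvProbKw)).foldl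
         (fun _ x => PySem.Str.slice (PySem.Str.strip x) none (some 90)) p,
       (l.filter (fun x => !pvMatches x pvProbKw && pvMatches x pvEvidKw)).foldl
         (fun _ x => PySem.Str.slice (PySem.Str.strip x) none (some 80)) e) := by
  induction l generalizing p e with
  | nil => simp
  | cons hd tl ih =>
    simp only [pvMatches_def] at ih
    by_cases hp : pvMatches hd pvProbKw
    · simp only [List.foldl_cons, List.filter_cons, pvMatches_def, hp, Bool.not_true,
        Bool.false_and, if_true, ih]
      simp
    · by_cases he : pvMatches hd pvEvidKw <;>
        simp only [List.foldl_cons, List.filter_cons, pvMatches_def, hp, he, Bool.not_false,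
          Bool.true_and, Bool.false_eq_true, if_true, if_false, ih]

-- ===== VERDICT (by name: the statement is the Claim_ definition above) =====
theorem extract_waste_info_py_spec : Claim_equal_extract_waste_info_py := by
  intro result _
  unfold Spec_extract_waste_info_py extract_waste_info_py extract_waste_info_py_alt
  simp only [pvFold_char, pvFoldl_last]
  generalize (List.filter (fun x => pvMatches x pvProbKw) ((PySem.Str.split? result "\n").getD [])).getLast? = o1
  generalize (List.filter (fun x => !pvMatches x pvProbKw && pvMatches x pvEvidKw) ((PySem.Str.split? result "\n").getD [])).getLast? = o2
  cases o1 <;> cases o2 <;> rfl
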